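-- pv_equiv track=rewrite | github.com/Iqbalahmed7/simulatte-popscale | popscale/analytics/event_impact.py | _match_option
-- ===== SOURCE A (Python) =====
-- from typing import Optional
--
-- def _match_option(outcome: str, options: list[str]) -> Optional[str]:
--     """Match an outcome string to one of the scenario options.
--
--     Priority: exact → containment → None (unclassified).
--     """
--     outcome_lower = outcome.strip().lower()
--     # Exact match
--     for opt in options:
--         if outcome_lower == opt.strip().lower():
--             return opt
--     # Containment
--     for opt in options:
--         if opt.strip().lower() in outcome_lower or outcome_lower in opt.strip().lower():
--             return opt
--     return None
-- ===== SOURCE B (Python) =====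
-- from typing import Optional
--
-- def _match_option(outcome: str, options: list[str]) -> Optional[str]:
--     """Single pass: exact match returns immediately; first containment match is
--     remembered as a fallback and returned only after the whole list is scanned."""
--     outcome_lower = outcome.strip().lower()
--     fallback = None
--     for opt in options:
--         opt_norm = opt.strip().lower()
--         if opt_norm == outcome_lower:
--             return opt
--         if fallback is None and (opt_norm in outcome_lower or outcome_lower in opt_norm):
--             fallback = opt
--     return fallback
-- ===== Notes on version B (the rewrite author's own statement) =====
-- stated objective: alternative
-- what changed: A's two separate passes (exact pass, then containment pass) are folded into one pass that returns on an exact match and remembers the first containment match as a fallback returned after the loop.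
import Mathlib
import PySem

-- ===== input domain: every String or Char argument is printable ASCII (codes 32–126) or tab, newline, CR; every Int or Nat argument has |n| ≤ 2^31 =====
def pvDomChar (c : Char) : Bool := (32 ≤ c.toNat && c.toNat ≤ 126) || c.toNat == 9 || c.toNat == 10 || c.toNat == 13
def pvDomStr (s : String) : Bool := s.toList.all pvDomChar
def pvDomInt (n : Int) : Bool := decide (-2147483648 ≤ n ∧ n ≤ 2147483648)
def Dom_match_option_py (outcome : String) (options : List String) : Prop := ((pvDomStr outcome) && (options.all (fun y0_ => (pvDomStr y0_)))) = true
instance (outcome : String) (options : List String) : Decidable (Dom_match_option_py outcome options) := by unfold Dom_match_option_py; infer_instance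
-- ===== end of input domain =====

-- B folds A's two passes (exact, then containment) into ONE pass that returns an
-- exact match immediately and remembers the first containment match as a fallback.

-- shared helper: opt.strip().lower()
def pvNorm (s : String) : String := PySem.Str.lower (PySem.Str.strip s)

-- ===== PORT A =====
-- first loop of A: exact match
def pvExactLoop (ol : String) (options : List String) : Option String :=
  match options with
  | [] => none
  | o :: t => if ol == pvNorm o then some o else pvExactLoop ol t

-- second loop of A: containment match
def pvContainLoop (ol : String) (options : List String) : Option String :=
  match options with
  | [] => none
  | o :: t =>
      if PySem.Str.isIn (pvNorm o) ol || PySem.Str.isIn ol (pvNorm o) then some o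
      else pvContainLoop ol t

def match_option_py (outcome : String) (options : List String) : Option String :=
  let ol := pvNorm outcome
  match pvExactLoop ol options with
  | some o => some o
  | none => pvContainLoop ol options

-- ===== PORT B =====
-- single loop with a remembered first-containment fallback
def pvBLoop (ol : String) (options : List String) (fallback : Option String) : Option String :=
  match options with
  | [] => fallback
  | o :: t =>
      let n := pvNorm o
      if ol == n then some o
      else if fallback.isNone && (PySem.Str.isIn n ol || PySem.Str.isIn ol n) then
        pvBLoop ol t (some o)
      else pvBLoop ol t fallback

def match_option_py_alt (outcome : String) (options : List String) : Option String :=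
  pvBLoop (pvNorm outcome) options none

-- ===== PRECONDITION & SPEC =====
def Spec_match_option_py (outcome : String) (options : List String) (out : Option String) : Prop := out = match_option_py_alt outcome options
instance (outcome : String) (options : List String) (out : Option String) : Decidable (Spec_match_option_py outcome options out) := by unfold Spec_match_option_py; infer_instance

-- ===== CLAIM (what is proved, stated in full; the proofs are below) =====
def Claim_equal_match_option_py : Prop := ∀ (outcome : String) (options : List String), Dom_match_option_py outcome options → Spec_match_option_py outcome options (match_option_py outcome options)

-- ===== LEMMAS AND PROOFS =====

-- invariant of B's loop: exact match wins; otherwise the fallback (if set) beats the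
-- containment scan of the rest, since once set it is never overwritten
theorem pvBLoop_eq (ol : String) (options : List String) (fb : Option String) :
    pvBLoop ol options fb =
      match pvExactLoop ol options with
      | some o => some o
      | none => match fb with
                | some f => some f
                | none => pvContainLoop ol options := by
  induction options generalizing fb with
  | nil => cases fb <;> simp [pvBLoop, pvExactLoop, pvContainLoop]
  | cons o t ih =>
      by_cases hx : ol == pvNorm o
      · simp [pvBLoop, pvExactLoop, hx]
      · by_cases hc : PySem.Chars.isIn (pvNorm o).toList ol.toList = true ∨
            PySem.Chars.isIn ol.toList (pvNorm o).toList = true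
        · cases fb with
          | none => simp [pvBLoop, pvExactLoop, pvContainLoop, hx, hc, ih]
          | some f => simp [pvBLoop, pvExactLoop, hx, ih]
        · cases fb with
          | none => simp [pvBLoop, pvExactLoop, pvContainLoop, hx, hc, ih]
          | some f => simp [pvBLoop, pvExactLoop, hx, ih]

-- ===== VERDICT (by name: the statement is the Claim_ definition above) =====
theorem match_option_py_spec : Claim_equal_match_option_py := by
  intro outcome options _
  unfold Spec_match_option_py match_option_py match_option_py_alt
  rw [pvBLoop_eq]
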